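-- pv_equiv track=rewrite | github.com/qianzii2/Z1DB | metal/bitmagic.py | pext
-- ===== SOURCE A (Python) =====
-- def pext(source: int, mask: int) -> int:
--     """并行位提取。将 source 中 mask 置位位置的值压缩到低位。"""
--     result = 0
--     k = 0
--     m = mask
--     while m:
--         lowest = m & (-m)
--         if source & lowest:
--             result |= (1 << k)
--         m &= m - 1
--         k += 1
--     return result
-- ===== SOURCE B (Python) =====
-- def pext(source: int, mask: int) -> int:
--     """并行位提取。将 source 中 mask 置位位置的值压缩到低位。"""
--     result = 0
--     k = 0
--     while mask:
--         if mask & 1: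
--             if source & 1:
--                 result |= (1 << k)
--             k += 1
--         source >>= 1
--         mask >>= 1
--     return result
-- ===== Notes on version B (the rewrite author's own statement) =====
-- stated objective: idiomatic
-- what changed: B walks the mask one bit position at a time with co-shifted source (shift-and-test), instead of A's isolate-lowest-set-bit loop using m&(-m) and m&(m-1) on an unshifted source.
import Mathlib
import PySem

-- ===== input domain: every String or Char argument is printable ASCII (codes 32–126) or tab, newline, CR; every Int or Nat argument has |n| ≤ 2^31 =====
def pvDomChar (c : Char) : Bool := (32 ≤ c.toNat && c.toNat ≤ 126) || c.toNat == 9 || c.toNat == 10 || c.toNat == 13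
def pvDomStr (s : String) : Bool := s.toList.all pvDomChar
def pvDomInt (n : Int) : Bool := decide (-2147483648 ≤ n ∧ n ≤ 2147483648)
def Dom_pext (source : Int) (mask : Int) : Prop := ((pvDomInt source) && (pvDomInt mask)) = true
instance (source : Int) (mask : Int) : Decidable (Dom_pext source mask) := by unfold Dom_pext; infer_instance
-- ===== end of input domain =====

-- B walks the mask one bit position at a time with a co-shifted source (shift-and-test)
-- instead of A's isolate-lowest-set-bit loop (m & -m, m &= m-1); same packed result.

-- pextLoopA's loop needs this cast fact for termination; it is also used by port B.
theorem int_cast_shiftRight_one (n : Nat) : ((n : Int) >>> 1) = ((n / 2 : Nat) : Int) := by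
  rw [show ((n : Int) >>> 1) = Int.ofNat (n >>> 1) from rfl, Nat.shiftRight_one]
  rfl

-- ===== PORT A =====
-- A's while loop: one iteration per set bit of m; isolates the lowest set bit with
-- m & (-m) and clears it with m &= m - 1.  For m < 0 Python loops forever — such
-- inputs are excluded by Pre_pext (the else-branch of the guard is never reached there).
def pextLoopA (source m result : Int) (k : Nat) : Int :=
  if h : 0 < m then
    let lowest := PySem.Int.band m (-m)
    let result' := if PySem.Int.band source lowest ≠ 0 then PySem.Int.bor result (1 <<< k) else result
    pextLoopA source (PySem.Int.band m (m - 1)) result' (k + 1)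
  else result
termination_by m.toNat
decreasing_by
  have hb : PySem.Int.band m (m - 1) = ((m.toNat &&& (m - 1).toNat : Nat) : Int) :=
    PySem.Int.band_of_nonneg (by omega) (by omega)
  have hle : m.toNat &&& (m - 1).toNat ≤ (m - 1).toNat := Nat.and_le_right
  omega


def pext (source : Int) (mask : Int) : Int :=
  pextLoopA source mask 0 0

-- ===== PORT B =====
-- B's while loop: one iteration per bit position of mask; shifts source and mask right
-- together and advances the output index k only at set mask positions.
def pextLoopB (source mask result : Int) (k : Nat) : Int :=
  if h : 0 < mask then
    let result' :=
      if PySem.Int.band mask 1 ≠ 0 then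
        (if PySem.Int.band source 1 ≠ 0 then PySem.Int.bor result (1 <<< k) else result)
      else result
    let k' := if PySem.Int.band mask 1 ≠ 0 then k + 1 else k
    pextLoopB (source >>> 1) (mask >>> 1) result' k'
  else result
termination_by mask.toNat
decreasing_by
  have h2 : mask >>> 1 = ((mask.toNat / 2 : Nat) : Int) := by
    conv_lhs => rw [show mask = ((mask.toNat : Nat) : Int) by omega]
    rw [int_cast_shiftRight_one]
  omega


def pext_alt (source : Int) (mask : Int) : Int :=
  pextLoopB source mask 0 0

-- ===== PRECONDITION & SPEC =====
-- Pre_pext excludes negative masks: there Python's A (and B) loop forever, returning nothing.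
def Pre_pext (source : Int) (mask : Int) : Prop := 0 ≤ mask
instance (source : Int) (mask : Int) : Decidable (Pre_pext source mask) := by unfold Pre_pext; infer_instance
def pvWitness_pext : Int × Int := (297, 106)

def Spec_pext (source : Int) (mask : Int) (out : Int) : Prop := out = pext_alt source mask
instance (source : Int) (mask : Int) (out : Int) : Decidable (Spec_pext source mask out) := by unfold Spec_pext; infer_instance

-- ===== CLAIM (what is proved, stated in full; the proofs are below) =====
def Claim_equal_pext : Prop := ∀ (source : Int) (mask : Int), Dom_pext source mask → Pre_pext source mask → Spec_pext source mask (pext source mask)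

-- ===== LEMMAS AND PROOFS =====

theorem nat_two_mul_and (a b : Nat) : (2 * a) &&& b = 2 * (a &&& (b / 2)) := by
  apply Nat.eq_of_testBit_eq
  intro i
  cases i with
  | zero =>
      rw [Nat.testBit_and, Nat.testBit_zero, Nat.testBit_zero, Nat.testBit_zero]
      simp [Nat.mul_mod_right]
  | succ i =>
      have ha : 2 * a / 2 = a := by omega
      have hx : 2 * (a &&& (b / 2)) / 2 = a &&& (b / 2) := by omega
      rw [Nat.testBit_and, Nat.testBit_succ, Nat.testBit_succ, Nat.testBit_succ, ha, hx,
        Nat.testBit_and]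

theorem nat_odd_and_pred (n : Nat) (h : n % 2 = 1) : n &&& (n - 1) = n - 1 := by
  apply Nat.eq_of_testBit_eq
  intro i
  cases i with
  | zero =>
      rw [Nat.testBit_and, Nat.testBit_zero, Nat.testBit_zero]
      simp [h]
  | succ i =>
      rw [Nat.testBit_and, Nat.testBit_succ, Nat.testBit_succ]
      have hd : n / 2 = (n - 1) / 2 := by omega
      rw [hd, Bool.and_self]

theorem nat_and_two_mul (a t : Nat) : a &&& (2 * t) = 2 * ((a / 2) &&& t) := by
  rw [Nat.and_comm, nat_two_mul_and, Nat.and_comm]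

theorem int_negSucc_shiftRight_one (u : Nat) : (Int.negSucc u) >>> 1 = Int.negSucc (u / 2) := by
  rw [show (Int.negSucc u) >>> 1 = Int.negSucc (u >>> 1) from rfl, Nat.shiftRight_one]

theorem band_two_mul (s : Int) (t : Nat) :
    PySem.Int.band s (2 * (t : Int)) = 2 * PySem.Int.band (s >>> 1) (t : Int) := by
  have h2t : (2 * (t : Int)) = ((2 * t : Nat) : Int) := by push_cast; ring
  rcases s with n | u
  · rw [show Int.ofNat n = ((n : Nat) : Int) from rfl, int_cast_shiftRight_one, h2t,
      PySem.Int.band_natCast, PySem.Int.band_natCast, nat_and_two_mul]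
    push_cast; ring
  · rw [int_negSucc_shiftRight_one]
    have e1 : PySem.Int.band (Int.negSucc u) (2 * (t : Int)) = ((2 * t - ((2 * t) &&& u) : Nat) : Int) := by
      rw [h2t]
      simp only [PySem.Int.band]
      rw [if_neg (by omega), if_pos (by positivity)]
      have h1 : ((2 * t : Nat) : Int).toNat = 2 * t := by omega
      have h2 : (-Int.negSucc u - 1).toNat = u := by omega
      rw [h1, h2]
    have e2 : PySem.Int.band (Int.negSucc (u / 2)) (t : Int) = ((t - (t &&& (u / 2)) : Nat) : Int) := by
      simp only [PySem.Int.band]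
      rw [if_neg (by omega), if_pos (by positivity)]
      have h1 : ((t : Nat) : Int).toNat = t := by omega
      have h2 : (-Int.negSucc (u / 2) - 1).toNat = u / 2 := by omega
      rw [h1, h2]
    rw [e1, e2]
    have hand : (2 * t) &&& u = 2 * (t &&& (u / 2)) := nat_two_mul_and t u
    have hle : t &&& (u / 2) ≤ t := Nat.and_le_left
    omega

theorem band_neg_self_cast (n : Nat) (h : 0 < n) :
    PySem.Int.band (n : Int) (-(n : Int)) = ((n - (n &&& (n - 1)) : Nat) : Int) := by
  simp only [PySem.Int.band]
  rw [if_pos (by positivity), if_neg (by omega)]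
  have h1 : ((n : Nat) : Int).toNat = n := by omega
  have h2 : (-(-(n : Int)) - 1).toNat = n - 1 := by omega
  rw [h1, h2]

theorem band_pred_cast (n : Nat) (h : 0 < n) :
    PySem.Int.band (n : Int) ((n : Int) - 1) = ((n &&& (n - 1) : Nat) : Int) := by
  have e : ((n : Int) - 1) = ((n - 1 : Nat) : Int) := by omega
  rw [e, PySem.Int.band_natCast]

theorem pextLoopA_pos (source m result : Int) (k : Nat) (h : 0 < m) :
    pextLoopA source m result k =
      pextLoopA source (PySem.Int.band m (m - 1))
        (if PySem.Int.band source (PySem.Int.band m (-m)) ≠ 0 then PySem.Int.bor result (1 <<< k) else result)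
        (k + 1) := by
  rw [pextLoopA, dif_pos h]

theorem pextLoopA_nonpos (source m result : Int) (k : Nat) (h : ¬ 0 < m) :
    pextLoopA source m result k = result := by
  rw [pextLoopA, dif_neg h]

theorem pextLoopB_pos (source mask result : Int) (k : Nat) (h : 0 < mask) :
    pextLoopB source mask result k =
      pextLoopB (source >>> 1) (mask >>> 1)
        (if PySem.Int.band mask 1 ≠ 0 then
            (if PySem.Int.band source 1 ≠ 0 then PySem.Int.bor result (1 <<< k) else result)
          else result)
        (if PySem.Int.band mask 1 ≠ 0 then k + 1 else k) := by
  rw [pextLoopB, dif_pos h]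

theorem pextLoopB_nonpos (source mask result : Int) (k : Nat) (h : ¬ 0 < mask) :
    pextLoopB source mask result k = result := by
  rw [pextLoopB, dif_neg h]

theorem pextLoopA_even (n : Nat) (source result : Int) (k : Nat) :
    pextLoopA source (2 * (n : Int)) result k = pextLoopA (source >>> 1) (n : Int) result k := by
  induction n using Nat.strong_induction_on generalizing result k with
  | _ n ih =>
    rcases Nat.eq_zero_or_pos n with h0 | hpos
    · subst h0
      rw [pextLoopA_nonpos _ _ _ _ (by norm_num), pextLoopA_nonpos _ _ _ _ (by norm_num)]
    · have h2n : (0 : Int) < 2 * (n : Int) := by positivity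
      have hn : (0 : Int) < (n : Int) := by exact_mod_cast hpos
      rw [pextLoopA_pos _ _ _ _ h2n, pextLoopA_pos _ _ _ _ hn]
      have hand : (2 * n) &&& (2 * n - 1) = 2 * (n &&& (n - 1)) := by
        have hh : (2 * n - 1) / 2 = n - 1 := by omega
        rw [nat_two_mul_and, hh]
      have hle : n &&& (n - 1) ≤ n - 1 := Nat.and_le_right
      have hw : PySem.Int.band (2 * (n : Int)) (-(2 * (n : Int)))
          = 2 * PySem.Int.band (n : Int) (-(n : Int)) := by
        have e1 : (2 * (n : Int)) = ((2 * n : Nat) : Int) := by push_cast; ring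
        rw [e1, band_neg_self_cast (2 * n) (by omega), band_neg_self_cast n hpos]
        omega
      have htest : PySem.Int.band source (PySem.Int.band (2 * (n : Int)) (-(2 * (n : Int))))
          = 2 * PySem.Int.band (source >>> 1) (PySem.Int.band (n : Int) (-(n : Int))) := by
        rw [hw, band_neg_self_cast n hpos, band_two_mul]
      have hclear : PySem.Int.band (2 * (n : Int)) (2 * (n : Int) - 1)
          = 2 * ((n &&& (n - 1) : Nat) : Int) := by
        have e1 : (2 * (n : Int)) = ((2 * n : Nat) : Int) := by push_cast; ring
        rw [e1, band_pred_cast (2 * n) (by omega), hand]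
        push_cast; ring
      have hiff : ∀ y : Int, (2 * y ≠ 0) = (y ≠ 0) := fun y => propext (by omega)
      simp only [htest, hclear, band_pred_cast n hpos, Nat.cast_ofNat, hiff]
      exact ih (n &&& (n - 1)) (by omega) _ _

theorem loops_agree (n : Nat) (source result : Int) (k : Nat) :
    pextLoopA source (n : Int) result k = pextLoopB source (n : Int) result k := by
  induction n using Nat.strong_induction_on generalizing source result k with
  | _ n ih =>
    rcases Nat.eq_zero_or_pos n with h0 | hpos
    · subst h0
      rw [pextLoopA_nonpos _ _ _ _ (by norm_num), pextLoopB_nonpos _ _ _ _ (by norm_num)]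
    · have hn : (0 : Int) < (n : Int) := by exact_mod_cast hpos
      have hshift : ((n : Int) >>> 1) = ((n / 2 : Nat) : Int) := int_cast_shiftRight_one n
      have hmask1 : PySem.Int.band (n : Int) 1 = ((n &&& 1 : Nat) : Int) := by
        rw [show (1 : Int) = ((1 : Nat) : Int) from rfl, PySem.Int.band_natCast]
      have hmod : n &&& 1 = n % 2 := Nat.and_one_is_mod n
      rcases Nat.even_or_odd n with he | ho
      · have heven : n % 2 = 0 := Nat.even_iff.mp he
        have hand1 : PySem.Int.band (n : Int) 1 = 0 := by
          rw [hmask1, hmod, heven]; rfl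
        rw [pextLoopB_pos _ _ _ _ hn, hand1]
        simp only [ne_eq, not_true_eq_false, not_false_eq_true, if_neg]
        rw [hshift]
        have e1 : ((n : Int)) = 2 * ((n / 2 : Nat) : Int) := by push_cast; omega
        rw [e1, pextLoopA_even]
        exact ih (n / 2) (by omega) _ _ _
      · have hodd : n % 2 = 1 := Nat.odd_iff.mp ho
        rw [pextLoopA_pos _ _ _ _ hn, pextLoopB_pos _ _ _ _ hn]
        have hlow1 : PySem.Int.band (n : Int) (-(n : Int)) = 1 := by
          rw [band_neg_self_cast n hpos, nat_odd_and_pred n hodd]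
          omega
        have hand1 : PySem.Int.band (n : Int) 1 = 1 := by
          rw [hmask1, hmod, hodd]; rfl
        rw [hlow1, hand1]
        simp only [ne_eq, one_ne_zero, not_false_eq_true, if_true]
        rw [band_pred_cast n hpos, nat_odd_and_pred n hodd]
        have e1 : ((n - 1 : Nat) : Int) = 2 * ((n / 2 : Nat) : Int) := by push_cast; omega
        rw [e1, pextLoopA_even, hshift]
        exact ih (n / 2) (by omega) _ _ _

-- ===== VERDICT (by name: the statement is the Claim_ definition above) =====
theorem pext_spec : Claim_equal_pext := by
  intro source mask _ hpre
  unfold Pre_pext at hpre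
  unfold Spec_pext pext pext_alt
  obtain ⟨n, rfl⟩ : ∃ n : Nat, mask = (n : Int) := ⟨mask.toNat, by omega⟩
  exact loops_agree n source 0 0
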